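-- pv_equiv track=rewrite | github.com/AlecXYZ/genomelody | mappings/nucleotides_to_binary.py | map_binary
-- ===== SOURCE A (Python) =====
-- binary_mapping = {
--     "000": 60, # C
--     "001": 62, # D
--     "010": 64, # E
--     "100": 65, # F
--     "011": 67, # G
--     "110": 69, # A
--     "101": 71, # H
--     "111": 72, # C
--     "A": "00",
--     "C": "01",
--     "G": "10",
--     "T": "11",
-- }
--
-- def map_binary(sequence, is_end):
--     """
--     Convert sequence of nucleotides into 2D notes array. The algorithm first splits the sequence into triplets and then converts them
--     to binary numbers based on the above dictionary. The resulting binary strings are parsed into 3-bit segments and mapped to notes.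
--     It returns the converted sequence and any leftover characters. In case when end of file flag is set to true, it converts leftover
--     characters too.
--
--     Arguments:
--         sequence (str): Lines of file (Commonly one line) containing nucleotides.
--         is_end (bool): End of file flag.
--     """
--     mapped_sequence = []
--
--     # Not processing leftover
--     if is_end is False:
--         i = 0
--         # Process the sequence in groups of 3 characters
--         while i < len(sequence):
--             # Get the next 3 characters
--             triplet = sequence[i:i+3]
--
--             # If triplet is shorter than 3, return it as leftover - only at the end of sequence
--             if len(triplet) < 3:
--                 return mapped_sequence, triplet
--
--             binary_string = ""
--             # Conversion of triplet into binary string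
--             for nucleotide in triplet:
--                 binary_string += binary_mapping[nucleotide]
--
--             # Split the triplet into halves
--             first_half = binary_string[:3]
--             second_half = binary_string[3:]
--
--             # Map them to notes using dictionary
--             first_note = binary_mapping.get(first_half)
--             second_note = binary_mapping.get(second_half)
--
--             # Append the result to the output sequence
--             if first_note is not None:
--                 mapped_sequence.append([first_note])
--             if second_note is not None:
--                 mapped_sequence.append([second_note])
--             i += 3 # Move to the next triplet
--     # Process leftover at the end of file - could be length of 2 or 1
--     else:
--         # Pad the leftover with A to length of 3
--         padded = sequence + "A" * (3 - len(sequence))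
--
--         binary_string = ""
--         # Conversion of triplet into binary string
--         for nucleotide in padded:
--                 binary_string += binary_mapping[nucleotide]
--
--         # Split the triplet into halves
--         first_half = binary_string[:3]
--         second_half = binary_string[3:]
--
--         # Map them to notes using dictionary
--         first_note = binary_mapping.get(first_half)
--         second_note = binary_mapping.get(second_half)
--
--         # Append the result to the output sequence
--         if first_note is not None:
--             mapped_sequence.append([first_note])
--         if second_note is not None:
--             mapped_sequence.append([second_note])
--
--     return mapped_sequence, ""  # No leftover, return empty string
-- ===== SOURCE B (Python) =====
-- # B: a 64-entry triplet->notes table precomputed once replaces per-character binary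
-- # encoding + halves-splitting in the main loop; the end-of-file leftover branch keeps
-- # A's padding behaviour (it handles at most a couple of characters).
-- NOTES = {"000": 60, "001": 62, "010": 64, "100": 65, "011": 67, "110": 69, "101": 71, "111": 72}
-- BITS = {"A": "00", "C": "01", "G": "10", "T": "11"}
--
-- TRIPLET_NOTES = {}
-- for _a in "ACGT":
--     for _b in "ACGT":
--         for _c in "ACGT":
--             _bits = BITS[_a] + BITS[_b] + BITS[_c]
--             TRIPLET_NOTES[_a + _b + _c] = (NOTES[_bits[:3]], NOTES[_bits[3:]])
--
-- def map_binary(sequence, is_end):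
--     if not is_end:
--         k = len(sequence) // 3
--         out = []
--         for j in range(k):
--             n1, n2 = TRIPLET_NOTES[sequence[3 * j:3 * j + 3]]
--             out.append([n1])
--             out.append([n2])
--         return out, sequence[3 * k:]
--     # end-of-file leftover: pad with 'A' to length 3 (A's edge behaviour kept)
--     padded = sequence + "A" * (3 - len(sequence))
--     bits = "".join(BITS[c] for c in padded)
--     out = []
--     n1 = NOTES.get(bits[:3])
--     n2 = NOTES.get(bits[3:])
--     if n1 is not None:
--         out.append([n1])
--     if n2 is not None:
--         out.append([n2])
--     return out, ""
-- ===== Notes on version B (the rewrite author's own statement) =====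
-- stated objective: alternative
-- what changed: B precomputes a 64-entry triplet->(note,note) lookup table once, so the main loop maps each full triplet with a single dictionary lookup, eliminating A's inner per-character binary-string building and halves-splitting; the end-of-file leftover branch keeps A's padding behaviour.
import Mathlib
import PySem

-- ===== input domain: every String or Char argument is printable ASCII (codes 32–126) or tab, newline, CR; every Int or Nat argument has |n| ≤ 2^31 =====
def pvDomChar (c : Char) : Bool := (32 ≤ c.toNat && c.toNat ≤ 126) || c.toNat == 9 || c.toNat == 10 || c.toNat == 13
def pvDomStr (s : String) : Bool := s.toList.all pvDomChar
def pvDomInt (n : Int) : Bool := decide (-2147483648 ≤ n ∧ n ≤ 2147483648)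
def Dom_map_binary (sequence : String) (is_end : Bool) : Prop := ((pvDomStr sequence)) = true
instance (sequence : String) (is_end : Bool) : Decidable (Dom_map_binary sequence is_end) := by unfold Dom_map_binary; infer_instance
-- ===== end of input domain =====

-- B precomputes a 64-entry triplet -> (note, note) table once, so the main loop maps each full
-- triplet with one lookup; A's inner per-character binary-string building and halves-splitting
-- disappear from the loop. The is_end=True leftover branch keeps A's padding behaviour.
-- The heterogeneous Python dict binary_mapping is split by value type into bmNote (3-bit string -> note)
-- and bmBits (nucleotide -> 2 bits); string keys/values are modelled as List Char for kernel transparency.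

-- ===== PORT A =====
def bmNote : PySem.Dict (List Char) Int :=
  PySem.Dict.ofList [("000".toList, 60), ("001".toList, 62), ("010".toList, 64), ("100".toList, 65),
                     ("011".toList, 67), ("110".toList, 69), ("101".toList, 71), ("111".toList, 72)]

def bmBits : PySem.Dict (List Char) (List Char) :=
  PySem.Dict.ofList [("A".toList, "00".toList), ("C".toList, "01".toList),
                     ("G".toList, "10".toList), ("T".toList, "11".toList)]

-- binary_string accumulation loop of A; the .getD [] stands for the KeyError (excluded by Pre_)
def binOfA (t : List Char) : List Char :=
  t.foldl (fun b c => b ++ (PySem.Dict.get? bmBits [c]).getD []) []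

-- A's while-loop: i-indexed slicing becomes structural take/drop on the remaining characters
def loopA : List Char → List (List Int) → List (List Int) × String
  | [], acc => (acc, "")
  | c :: rest, acc =>
    let triplet := (c :: rest).take 3
    if triplet.length < 3 then (acc, String.ofList triplet)
    else
      let bs := binOfA triplet
      let firstHalf := bs.take 3
      let secondHalf := bs.drop 3
      let acc1 : List (List Int) :=
        match PySem.Dict.get? bmNote firstHalf with
        | some n => acc ++ [[n]]
        | none => acc
      let acc2 : List (List Int) :=
        match PySem.Dict.get? bmNote secondHalf with
        | some n => acc1 ++ [[n]]
        | none => acc1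
      loopA ((c :: rest).drop 3) acc2
  termination_by cs _ => cs.length

def map_binary (sequence : String) (is_end : Bool) : List (List Int) × String :=
  if is_end = false then
    loopA sequence.toList []
  else
    let cs := sequence.toList
    let padded := cs ++ List.replicate (3 - cs.length) 'A'
    let bs := binOfA padded
    let firstHalf := bs.take 3
    let secondHalf := bs.drop 3
    let m1 : List (List Int) :=
      match PySem.Dict.get? bmNote firstHalf with
      | some n => [] ++ [[n]]
      | none => []
    let m2 : List (List Int) :=
      match PySem.Dict.get? bmNote secondHalf with
      | some n => m1 ++ [[n]]
      | none => m1
    (m2, "")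

-- ===== PORT B =====
-- BITS[c] of Source B; .getD [] stands for the KeyError (never reached: table keys are literals)
def bitsOfB (c : Char) : List Char := (PySem.Dict.get? bmBits [c]).getD []

-- the nested _a/_b/_c loops of Source B building TRIPLET_NOTES once
def tripTable : PySem.Dict (List Char) (Int × Int) :=
  "ACGT".toList.foldl (fun d a =>
    "ACGT".toList.foldl (fun d b =>
      "ACGT".toList.foldl (fun d c =>
        let bits := bitsOfB a ++ bitsOfB b ++ bitsOfB c
        PySem.Dict.insert d [a, b, c]
          ((PySem.Dict.get? bmNote (bits.take 3)).getD 0,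
           (PySem.Dict.get? bmNote (bits.drop 3)).getD 0)) d) d) PySem.Dict.empty

-- the `for j in range(k)` loop of Source B; the .getD (0,0) stands for the KeyError (excluded by Pre_)
def loopB : Nat → List Char → List (List Int)
  | 0, _ => []
  | Nat.succ j, cs =>
    let p := (PySem.Dict.get? tripTable (cs.take 3)).getD (0, 0)
    [p.1] :: [p.2] :: loopB j (cs.drop 3)

def map_binary_alt (sequence : String) (is_end : Bool) : List (List Int) × String :=
  if is_end = false then
    let cs := sequence.toList
    let k := cs.length / 3
    (loopB k cs, String.ofList (cs.drop (3 * k)))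
  else
    let cs := sequence.toList
    let padded := cs ++ List.replicate (3 - cs.length) 'A'
    let bits := (padded.map bitsOfB).flatten
    let out :=
      (match PySem.Dict.get? bmNote (bits.take 3) with
       | some n => [[n]]
       | none => ([] : List (List Int))) ++
      (match PySem.Dict.get? bmNote (bits.drop 3) with
       | some n => [[n]]
       | none => ([] : List (List Int)))
    (out, "")

-- ===== PRECONDITION & SPEC =====
def isNuc (c : Char) : Bool := c == 'A' || c == 'C' || c == 'G' || c == 'T'

-- Pre_ excludes exactly the inputs on which Python A raises KeyError: a character outside
-- {A,C,G,T} inside a full triplet when is_end is False, or anywhere when is_end is True.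
def Pre_map_binary (sequence : String) (is_end : Bool) : Prop :=
  (if is_end then sequence.toList
   else sequence.toList.take (3 * (sequence.toList.length / 3))).all isNuc = true

instance (sequence : String) (is_end : Bool) : Decidable (Pre_map_binary sequence is_end) := by
  unfold Pre_map_binary; infer_instance

def pvWitness_map_binary : String × Bool := ("ACGTACG", false)

def Spec_map_binary (sequence : String) (is_end : Bool) (out : List (List Int) × String) : Prop := out = map_binary_alt sequence is_end
instance (sequence : String) (is_end : Bool) (out : List (List Int) × String) : Decidable (Spec_map_binary sequence is_end out) := by unfold Spec_map_binary; infer_instance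

-- ===== CLAIM (what is proved, stated in full; the proofs are below) =====
def Claim_equal_map_binary : Prop := ∀ (sequence : String) (is_end : Bool), Dom_map_binary sequence is_end → Pre_map_binary sequence is_end → Spec_map_binary sequence is_end (map_binary sequence is_end)

-- ===== LEMMAS AND PROOFS =====

-- the two notes one full triplet contributes in A
def deltaA (a b c : Char) : List (List Int) :=
  let bs := binOfA [a, b, c]
  (match PySem.Dict.get? bmNote (bs.take 3) with
   | some n => [[n]]
   | none => ([] : List (List Int))) ++
  (match PySem.Dict.get? bmNote (bs.drop 3) with
   | some n => [[n]]
   | none => ([] : List (List Int)))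

theorem isNuc_cases {a : Char} (h : isNuc a = true) : a = 'A' ∨ a = 'C' ∨ a = 'G' ∨ a = 'T' := by
  simp [isNuc] at h; tauto

theorem binOfA_aux (l : List Char) (s : List Char) :
    l.foldl (fun b c => b ++ (PySem.Dict.get? bmBits [c]).getD []) s = s ++ (l.map bitsOfB).flatten := by
  induction l generalizing s with
  | nil => simp
  | cons x xs ih => simp [ih, bitsOfB, List.append_assoc]

theorem binOfA_eq (l : List Char) : binOfA l = (l.map bitsOfB).flatten := by
  unfold binOfA; rw [binOfA_aux]; simp

theorem loopA_cons (a b c : Char) (rest : List Char) (acc : List (List Int)) :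
    loopA (a :: b :: c :: rest) acc = loopA rest (acc ++ deltaA a b c) := by
  rw [loopA.eq_def]
  simp only [deltaA, List.take_succ_cons, List.take_zero, List.drop_succ_cons, List.drop_zero]
  simp only [List.length_cons, List.length_nil]
  norm_num
  rcases PySem.Dict.get? bmNote ((binOfA [a, b, c]).take 3) with _ | n1 <;>
    rcases PySem.Dict.get? bmNote ((binOfA [a, b, c]).drop 3) with _ | n2 <;> simp

-- one full triplet of nucleotides: A's two-lookup contribution equals B's single table lookup
set_option maxRecDepth 8192 in
theorem deltaA_eq_trip (a b c : Char) (ha : isNuc a = true) (hb : isNuc b = true) (hc : isNuc c = true) :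
    deltaA a b c =
      (let p := (PySem.Dict.get? tripTable [a, b, c]).getD (0, 0); [[p.1], [p.2]]) := by
  rcases isNuc_cases ha with rfl | rfl | rfl | rfl <;>
    rcases isNuc_cases hb with rfl | rfl | rfl | rfl <;>
      rcases isNuc_cases hc with rfl | rfl | rfl | rfl <;> decide

theorem loopA_eq (cs : List Char) (acc : List (List Int))
    (h : (cs.take (3 * (cs.length / 3))).all isNuc = true) :
    loopA cs acc =
      (acc ++ loopB (cs.length / 3) cs,
       String.ofList (cs.drop (3 * (cs.length / 3)))) := by
  match cs with
  | [] => rw [loopA.eq_def]; simp [loopB]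
  | [a] => rw [loopA.eq_def]; simp [loopB]
  | [a, b] => rw [loopA.eq_def]; simp [loopB]
  | a :: b :: c :: rest =>
    have hk : (a :: b :: c :: rest).length / 3 = rest.length / 3 + 1 := by
      simp [List.length_cons]; omega
    have htake : (a :: b :: c :: rest).take (3 * ((a :: b :: c :: rest).length / 3)) =
        a :: b :: c :: rest.take (3 * (rest.length / 3)) := by
      rw [hk]; have : 3 * (rest.length / 3 + 1) = (3 * (rest.length / 3)) + 3 := by ring
      rw [this]; rfl
    have hdrop : (a :: b :: c :: rest).drop (3 * ((a :: b :: c :: rest).length / 3)) =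
        rest.drop (3 * (rest.length / 3)) := by
      rw [hk]; have : 3 * (rest.length / 3 + 1) = (3 * (rest.length / 3)) + 3 := by ring
      rw [this]; rfl
    rw [htake] at h
    simp only [List.all_cons, Bool.and_eq_true] at h
    obtain ⟨ha, hb, hc, hrest⟩ := h
    have ih := loopA_eq rest (acc ++ deltaA a b c) hrest
    rw [loopA_cons, ih, hdrop, hk]
    have hB : loopB (rest.length / 3 + 1) (a :: b :: c :: rest) =
        deltaA a b c ++ loopB (rest.length / 3) rest := by
      rw [loopB]
      simp only [List.take_succ_cons, List.take_zero, List.drop_succ_cons, List.drop_zero]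
      rw [deltaA_eq_trip a b c ha hb hc]
      simp
    rw [hB, List.append_assoc]
  termination_by cs.length

-- ===== VERDICT (by name: the statement is the Claim_ definition above) =====
theorem map_binary_spec : Claim_equal_map_binary := by
  intro s e _ hpre
  unfold Spec_map_binary
  cases e with
  | false =>
    unfold Pre_map_binary at hpre
    simp only [if_neg (by decide : ¬ (false = true))] at hpre
    unfold map_binary map_binary_alt
    rw [loopA_eq s.toList [] hpre]
    simp
  | true =>
    unfold map_binary map_binary_alt
    simp only [if_neg (by decide : ¬ (true = false))]
    rw [binOfA_eq]
    rcases PySem.Dict.get? bmNote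
        ((((s.toList ++ List.replicate (3 - s.toList.length) 'A').map bitsOfB).flatten).take 3) with _ | n1 <;>
      rcases PySem.Dict.get? bmNote
          ((((s.toList ++ List.replicate (3 - s.toList.length) 'A').map bitsOfB).flatten).drop 3) with _ | n2 <;>
        simp
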